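-- pv_equiv track=rewrite | github.com/wmltogether/Project-Console-Game-Localization | PS2/Shin Megami Tensei III/StoryTool/storyimport.py | makestrDict
-- ===== SOURCE A (Python) =====
-- def makestrDict(lines):
--     string_list = []
--     head_list = []
--     strDict = {}
--     num = len(lines)
--     for index, line in enumerate(lines):
--         if u'####' in line:
--             head_list.append(line[5:-7])
--             i = 1
--             string = ''
--             while True:
--                 if index + i >= num:
--                     break
--                 if '####' in lines[index + i]:
--                     break
--                 string += lines[index + i]
--                 i += 1
--             string_list.append(string[:-4])
--             strDict[line[5:-7]] = string[:-4]
--     return strDict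
-- ===== SOURCE B (Python) =====
-- def makestrDict(lines):
--     strDict = {}
--     key = None
--     acc = ''
--     for line in lines:
--         if '####' in line:
--             if key is not None:
--                 strDict[key] = acc[:-4]
--             key = line[5:-7]
--             acc = ''
--         elif key is not None:
--             acc += line
--     if key is not None:
--         strDict[key] = acc[:-4]
--     return strDict
-- ===== Notes on version B (the rewrite author's own statement) =====
-- stated objective: simpler
-- what changed: Replaced the per-header inner forward-scan while loop (indexing back into lines) with a single pass keeping a current key and accumulator that flushes each block when the next header or the end is reached.
import Mathlib
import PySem

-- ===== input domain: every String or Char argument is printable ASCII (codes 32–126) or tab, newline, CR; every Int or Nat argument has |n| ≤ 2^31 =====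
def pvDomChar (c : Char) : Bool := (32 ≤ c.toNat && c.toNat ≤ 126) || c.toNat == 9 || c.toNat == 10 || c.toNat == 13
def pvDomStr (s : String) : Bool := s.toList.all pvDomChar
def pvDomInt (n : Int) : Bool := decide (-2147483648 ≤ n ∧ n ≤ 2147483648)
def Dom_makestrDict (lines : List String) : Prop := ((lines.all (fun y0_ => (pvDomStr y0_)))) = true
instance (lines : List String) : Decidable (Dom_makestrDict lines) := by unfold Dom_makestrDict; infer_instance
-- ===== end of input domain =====

-- B replaces A's per-header inner forward-scan (re-indexing into `lines`) by a single pass with a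
-- current key and an accumulator; objective: simpler. Return value only (A's dict is returned fresh).

-- ===== PORT A =====
-- A's inner `while True` scan: starting at lines[index+i], append lines until a '####' line or the end.
def pvCollectA (lines : List String) (num index i : Int) (string : String) : String :=
  if index + i ≥ num then string
  else if PySem.Str.isIn "####" (PySem.List.pyGetD lines (index + i) "") then string
  else pvCollectA lines num index (i + 1) (string ++ PySem.List.pyGetD lines (index + i) "")
termination_by (num - (index + i)).toNat
decreasing_by omega

-- A's loop body over (index, line); state = (string_list, head_list, strDict)
def pvStepA (lines : List String) (num : Int)
    (st : List String × List String × PySem.Dict String String) (p : Int × String) :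
    List String × List String × PySem.Dict String String :=
  if PySem.Str.isIn "####" p.2 then
    let head_list := st.2.1 ++ [PySem.Str.slice p.2 (some 5) (some (-7))]
    let string := pvCollectA lines num p.1 1 ""
    let string_list := st.1 ++ [PySem.Str.slice string none (some (-4))]
    let strDict := st.2.2.insert (PySem.Str.slice p.2 (some 5) (some (-7)))
        (PySem.Str.slice string none (some (-4)))
    (string_list, head_list, strDict)
  else st

def makestrDict (lines : List String) : List (String × String) :=
  (((PySem.List.enumerate lines 0).foldl (pvStepA lines (lines.length : Int))
      ([], [], PySem.Dict.empty)).2.2).items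

-- ===== PORT B =====
-- B's loop body; state = (strDict, open key (None → no header seen yet), accumulator)
def pvStepB (st : PySem.Dict String String × Option String × String) (line : String) :
    PySem.Dict String String × Option String × String :=
  if PySem.Str.isIn "####" line then
    (match st.2.1 with
     | some k => st.1.insert k (PySem.Str.slice st.2.2 none (some (-4)))
     | none => st.1,
     some (PySem.Str.slice line (some 5) (some (-7))), "")
  else
    match st.2.1 with
    | some _ => (st.1, st.2.1, st.2.2 ++ line)
    | none => st

-- B's trailing flush of the last open block
def pvFlush (st : PySem.Dict String String × Option String × String) : List (String × String) :=
  match st.2.1 with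
  | some k => (st.1.insert k (PySem.Str.slice st.2.2 none (some (-4)))).items
  | none => st.1.items

def makestrDict_alt (lines : List String) : List (String × String) :=
  pvFlush (lines.foldl pvStepB (PySem.Dict.empty, none, ""))

-- ===== PRECONDITION & SPEC =====
def Spec_makestrDict (lines : List String) (out : List (String × String)) : Prop := out = makestrDict_alt lines
instance (lines : List String) (out : List (String × String)) : Decidable (Spec_makestrDict lines out) := by unfold Spec_makestrDict; infer_instance

-- ===== CLAIM (what is proved, stated in full; the proofs are below) =====
def Claim_equal_makestrDict : Prop := ∀ (lines : List String), Dom_makestrDict lines → Spec_makestrDict lines (makestrDict lines)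

-- ===== LEMMAS AND PROOFS =====

-- common spec: collect the lines before the next header
def pvCollect : List String → String → String
  | [], s => s
  | l :: ls, s => if PySem.Str.isIn "####" l then s else pvCollect ls (s ++ l)

-- common spec: structural recursion inserting each header's block
def pvGo (d : PySem.Dict String String) : List String → PySem.Dict String String
  | [] => d
  | l :: ls =>
    if PySem.Str.isIn "####" l then
      pvGo (d.insert (PySem.Str.slice l (some 5) (some (-7)))
            (PySem.Str.slice (pvCollect ls "") none (some (-4)))) ls
    else pvGo d ls

lemma pvCollectA_eq (n : Nat) : ∀ (lines : List String) (index i : Int) (s : String),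
    0 ≤ index + i → (lines.length - (index + i)).toNat ≤ n →
    pvCollectA lines lines.length index i s = pvCollect (lines.drop (index + i).toNat) s := by
  induction n with
  | zero =>
    intro lines index i s h0 hn
    have hge : index + i ≥ (lines.length : Int) := by omega
    rw [pvCollectA, if_pos hge]
    have : lines.drop (index + i).toNat = [] := List.drop_eq_nil_of_le (by omega)
    simp [this, pvCollect]
  | succ n ih =>
    intro lines index i s h0 hn
    by_cases hge : index + i ≥ (lines.length : Int)
    · rw [pvCollectA, if_pos hge]
      have : lines.drop (index + i).toNat = [] := List.drop_eq_nil_of_le (by omega)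
      simp [this, pvCollect]
    · have hlt : (index + i).toNat < lines.length := by omega
      have hget : PySem.List.pyGetD lines (index + i) "" = lines[(index + i).toNat] :=
        PySem.List.pyGetD_eq_getElem lines "" h0 (by omega)
      have hdrop : lines.drop (index + i).toNat =
          lines[(index + i).toNat] :: lines.drop ((index + i).toNat + 1) :=
        (List.drop_eq_getElem_cons hlt)
      rw [pvCollectA, if_neg hge, hget, hdrop, pvCollect]
      by_cases hh : PySem.Str.isIn "####" lines[(index + i).toNat] = true
      · rw [if_pos hh, if_pos hh]
      · rw [if_neg hh, if_neg hh]
        have : (index + (i + 1)).toNat = (index + i).toNat + 1 := by omega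
        rw [ih lines index (i + 1) (s ++ lines[(index + i).toNat]) (by omega) (by omega), this]

lemma pvFoldA_eq (lines : List String) : ∀ (suffix : List String) (k : Nat)
    (t : List String × List String × PySem.Dict String String),
    lines.drop k = suffix →
    (((PySem.List.enumerate suffix (k : Int)).foldl (pvStepA lines lines.length) t).2.2)
      = pvGo t.2.2 suffix := by
  intro suffix
  induction suffix with
  | nil => intro k t h; simp [PySem.List.enumerate_nil, pvGo]
  | cons l ls ih =>
    intro k t h
    have hdrop1 : lines.drop (k + 1) = ls := by
      have := congrArg (List.drop 1) h
      simpa [List.drop_drop, Nat.add_comm] using this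
    rw [PySem.List.enumerate_cons, List.foldl_cons]
    by_cases hh : PySem.Str.isIn "####" l = true
    · have hc : pvCollectA lines lines.length (k : Int) 1 "" = pvCollect ls "" := by
        rw [pvCollectA_eq (lines.length) lines (k : Int) 1 "" (by omega) (by omega)]
        have : ((k : Int) + 1).toNat = k + 1 := by omega
        rw [this, hdrop1]
      have hstep : pvStepA lines lines.length t ((k : Int), l) =
          (t.1 ++ [PySem.Str.slice (pvCollectA lines lines.length (k : Int) 1 "") none (some (-4))],
           t.2.1 ++ [PySem.Str.slice l (some 5) (some (-7))],
           t.2.2.insert (PySem.Str.slice l (some 5) (some (-7)))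
             (PySem.Str.slice (pvCollectA lines lines.length (k : Int) 1 "") none (some (-4)))) := by
        unfold pvStepA; dsimp only; rw [if_pos hh]
      rw [hstep]
      have : ((k : Int) + 1) = ((k + 1 : Nat) : Int) := by push_cast; ring
      rw [this, ih (k + 1) _ hdrop1, pvGo, if_pos hh, hc]
    · have hstep : pvStepA lines lines.length t ((k : Int), l) = t := by
        unfold pvStepA; dsimp only; rw [if_neg hh]
      rw [hstep]
      have : ((k : Int) + 1) = ((k + 1 : Nat) : Int) := by push_cast; ring
      rw [this, ih (k + 1) _ hdrop1, pvGo, if_neg hh]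

lemma pvFoldB_open : ∀ (ls : List String) (d : PySem.Dict String String) (k acc : String),
    pvFlush (ls.foldl pvStepB (d, some k, acc))
      = (pvGo (d.insert k (PySem.Str.slice (pvCollect ls acc) none (some (-4)))) ls).items := by
  intro ls
  induction ls with
  | nil => intro d k acc; simp [pvFlush, pvGo, pvCollect]
  | cons l rest ih =>
    intro d k acc
    rw [List.foldl_cons]
    by_cases hh : PySem.Str.isIn "####" l = true
    · have : pvStepB (d, some k, acc) l =
          (d.insert k (PySem.Str.slice acc none (some (-4))),
           some (PySem.Str.slice l (some 5) (some (-7))), "") := by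
        unfold pvStepB; dsimp only; rw [if_pos hh]
      rw [this, ih, pvGo, if_pos hh, pvCollect, if_pos hh]
    · have : pvStepB (d, some k, acc) l = (d, some k, acc ++ l) := by
        unfold pvStepB; dsimp only; rw [if_neg hh]
      rw [this, ih, pvGo, if_neg hh, pvCollect, if_neg hh]

lemma pvFoldB_none : ∀ (ls : List String) (d : PySem.Dict String String) (acc : String),
    pvFlush (ls.foldl pvStepB (d, none, acc)) = (pvGo d ls).items := by
  intro ls
  induction ls with
  | nil => intro d acc; simp [pvFlush, pvGo]
  | cons l rest ih =>
    intro d acc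
    rw [List.foldl_cons]
    by_cases hh : PySem.Str.isIn "####" l = true
    · have : pvStepB (d, none, acc) l =
          (d, some (PySem.Str.slice l (some 5) (some (-7))), "") := by
        unfold pvStepB; dsimp only; rw [if_pos hh]
      rw [this, pvFoldB_open, pvGo, if_pos hh]
    · have : pvStepB (d, none, acc) l = (d, none, acc) := by
        unfold pvStepB; dsimp only; rw [if_neg hh]
      rw [this, ih, pvGo, if_neg hh]

-- ===== VERDICT (by name: the statement is the Claim_ definition above) =====
theorem makestrDict_spec : Claim_equal_makestrDict := by
  intro lines _hdom
  unfold Spec_makestrDict makestrDict makestrDict_alt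
  have hA := pvFoldA_eq lines lines 0 ([], [], PySem.Dict.empty) (by simp)
  simp only [Nat.cast_zero] at hA
  rw [hA, pvFoldB_none lines PySem.Dict.empty ""]
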